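-- pv_equiv track=rewrite | github.com/N00B-93/Python_Programming | Multidimensional_Lists/LargestRowAndColumn.py | countOnesInColumns
-- ===== SOURCE A (Python) =====
-- def countOnesInColumns(matrix):
--     """
--     Returns the index of the column that has the highest number of 1's
--
--     :param matrix: (list) The matrix to be processed.
--
--     :return: (list) The list containing the indices with the highest number of 1's
--     """
--     counter = 0
--     counterList = []
--
--     for i in range(len(matrix)):
--         for j in range(len(matrix[0])):
--             if matrix[j][i] == 1:
--                 counter += 1
--         counterList.append(counter)
--         counter = 0
--
--     maxIndex = []
--     return [maxIndex.append(i) or i for i in range(len(counterList)) if counterList[i] >= max(counterList)]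
-- ===== SOURCE B (Python) =====
-- def countOnesInColumns(matrix):
--     best = -1
--     result = []
--     for i in range(len(matrix)):
--         count = sum(1 for j in range(len(matrix[0])) if matrix[j][i] == 1)
--         if count > best:
--             best = count
--             result = [i]
--         elif count == best:
--             result.append(i)
--     return result
-- ===== Notes on version B (the rewrite author's own statement) =====
-- stated objective: simpler
-- what changed: B replaces A's two-pass scheme (build counterList, then filter indices by a recomputed max) with a single pass that keeps a running best count and result list; the inner column-count loop and matrix[j][i] indexing are unchanged.
import Mathlib
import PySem

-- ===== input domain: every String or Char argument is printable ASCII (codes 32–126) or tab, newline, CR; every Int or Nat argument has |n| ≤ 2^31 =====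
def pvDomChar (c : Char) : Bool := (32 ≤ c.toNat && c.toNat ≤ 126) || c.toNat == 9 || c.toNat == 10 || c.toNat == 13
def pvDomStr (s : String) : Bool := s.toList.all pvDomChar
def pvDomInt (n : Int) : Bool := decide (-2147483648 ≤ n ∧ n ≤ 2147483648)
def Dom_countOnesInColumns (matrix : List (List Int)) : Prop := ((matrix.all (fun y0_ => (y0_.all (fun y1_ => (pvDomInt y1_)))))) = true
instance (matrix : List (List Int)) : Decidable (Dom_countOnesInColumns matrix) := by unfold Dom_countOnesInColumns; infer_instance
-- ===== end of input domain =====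

-- B changes the decomposition: one pass keeping a running best count and result list, instead of
-- building counterList and then filtering by a recomputed max (objective: simpler).

-- shared helper: the identical inner loop of both Pythons — count of ones in column i,
-- scanning j over range(len(matrix[0])) and testing matrix[j][i] == 1
def pvColCount (matrix : List (List Int)) (i : Int) : Int :=
  (PySem.List.pyRange 0 ((PySem.List.pyGetD matrix 0 []).length : Int) 1).foldl
    (fun c j => if PySem.List.pyGetD (PySem.List.pyGetD matrix j []) i 0 = 1 then c + 1 else c) 0

-- ===== PORT A =====
def countOnesInColumns (matrix : List (List Int)) : List Int :=
  let counterList : List Int :=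
    (PySem.List.pyRange 0 (matrix.length : Int) 1).map (pvColCount matrix)
  let maxv : Int := (PySem.List.max? counterList (fun y => y)).getD 0
  (PySem.List.pyRange 0 (counterList.length : Int) 1).filter
    (fun i => decide (PySem.List.pyGetD counterList i 0 ≥ maxv))

-- ===== PORT B =====
def countOnesInColumns_alt (matrix : List (List Int)) : List Int :=
  ((PySem.List.pyRange 0 (matrix.length : Int) 1).foldl
    (fun st i =>
      let c := pvColCount matrix i
      if c > st.1 then (c, [i])
      else if c = st.1 then (st.1, st.2 ++ [i])
      else st)
    ((-1 : Int), ([] : List Int))).2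

-- ===== PRECONDITION & SPEC =====
-- Pre_ excludes exactly the inputs where Python A raises IndexError on matrix[j][i]:
-- shapes with fewer rows than len(matrix[0]), or a scanned row shorter than len(matrix).
def Pre_countOnesInColumns (matrix : List (List Int)) : Prop :=
  (matrix.headD []).length ≤ matrix.length ∧
    ∀ row ∈ matrix.take (matrix.headD []).length, matrix.length ≤ row.length
instance (matrix : List (List Int)) : Decidable (Pre_countOnesInColumns matrix) := by
  unfold Pre_countOnesInColumns; infer_instance
def pvWitness_countOnesInColumns : List (List Int) := [[1, 0], [1, 1]]

def Spec_countOnesInColumns (matrix : List (List Int)) (out : List Int) : Prop := out = countOnesInColumns_alt matrix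
instance (matrix : List (List Int)) (out : List Int) : Decidable (Spec_countOnesInColumns matrix out) := by unfold Spec_countOnesInColumns; infer_instance

-- ===== CLAIM (what is proved, stated in full; the proofs are below) =====
def Claim_equal_countOnesInColumns : Prop := ∀ (matrix : List (List Int)), Dom_countOnesInColumns matrix → Pre_countOnesInColumns matrix → Spec_countOnesInColumns matrix (countOnesInColumns matrix)

-- ===== LEMMAS AND PROOFS =====

theorem le_foldl_max_key (f : Int → Int) (l : List Int) (b : Int) :
    b ≤ l.foldl (fun a i => max a (f i)) b := by
  induction l generalizing b with
  | nil => simp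
  | cons i l ih => exact le_trans (le_max_left b (f i)) (ih (max b (f i)))

-- running best/result fold = (max, filter-by-max)
theorem foldl_best (f : Int → Int) (l : List Int) (b : Int) (r : List Int) :
    l.foldl
      (fun st i =>
        let c := f i
        if c > st.1 then (c, [i])
        else if c = st.1 then (st.1, st.2 ++ [i])
        else st)
      (b, r)
    = (l.foldl (fun a i => max a (f i)) b,
       (if l.foldl (fun a i => max a (f i)) b = b then r else [])
         ++ l.filter (fun i => decide (f i = l.foldl (fun a i => max a (f i)) b))) := by
  induction l generalizing b r with
  | nil => simp
  | cons i l ih =>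
    simp only [List.foldl_cons, List.filter_cons]
    rcases lt_trichotomy b (f i) with h | h | h
    · have hm : max b (f i) = f i := max_eq_right h.le
      rw [show (if f i > b then ((f i), [i])
            else if f i = b then (b, r ++ [i]) else (b, r)) = ((f i), [i]) by
          simp [h]]
      rw [ih (f i) [i]]
      simp only [hm]
      have hMb : l.foldl (fun a i => max a (f i)) (f i) ≠ b := by
        have := le_foldl_max_key f l (f i); omega
      simp only [if_neg hMb]
      by_cases hfi : f i = l.foldl (fun a i => max a (f i)) (f i)
      · simp [← hfi]
      · have hfi' : (l.foldl (fun a i => max a (f i)) (f i)) ≠ f i := fun hh => hfi hh.symm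
        simp [hfi', hfi]
    · have hm : max b (f i) = b := by rw [← h]; exact max_self b
      rw [show (if f i > b then ((f i), [i])
            else if f i = b then (b, r ++ [i]) else (b, r)) = (b, r ++ [i]) by
          subst h; simp]
      rw [ih b (r ++ [i])]
      simp only [hm]
      by_cases hMb : l.foldl (fun a i => max a (f i)) b = b
      · have hfi : f i = l.foldl (fun a i => max a (f i)) b := by omega
        simp [hMb, hfi]
      · have hfi : f i ≠ l.foldl (fun a i => max a (f i)) b := by
          have := le_foldl_max_key f l b; omega
        simp [hMb, hfi]
    · have hm : max b (f i) = b := max_eq_left h.le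
      rw [show (if f i > b then ((f i), [i])
            else if f i = b then (b, r ++ [i]) else (b, r)) = (b, r) by
          rw [if_neg (by omega), if_neg (by omega)]]
      rw [ih b r]
      simp only [hm]
      have hfi : f i ≠ l.foldl (fun a i => max a (f i)) b := by
        have := le_foldl_max_key f l b; omega
      simp [hfi]

theorem colCount_nonneg (matrix : List (List Int)) (i : Int) : 0 ≤ pvColCount matrix i := by
  unfold pvColCount
  generalize PySem.List.pyRange 0 ((PySem.List.pyGetD matrix 0 []).length : Int) 1 = l
  have h : ∀ (l : List Int) (c : Int), 0 ≤ c →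
      0 ≤ l.foldl (fun c j => if PySem.List.pyGetD (PySem.List.pyGetD matrix j []) i 0 = 1 then c + 1 else c) c := by
    intro l
    induction l with
    | nil => intro c hc; simpa using hc
    | cons j l ih => intro c hc; simp only [List.foldl_cons]; split_ifs <;> [exact ih _ (by omega); exact ih _ hc]
  exact h l 0 le_rfl

-- ===== VERDICT (by name: the statement is the Claim_ definition above) =====
theorem countOnesInColumns_spec : Claim_equal_countOnesInColumns := by
  intro matrix _ _
  by_cases hne : matrix = []
  · subst hne; rfl
  unfold Spec_countOnesInColumns countOnesInColumns countOnesInColumns_alt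
  set f := pvColCount matrix with hf
  set n : Int := (matrix.length : Int) with hn
  set l := PySem.List.pyRange 0 n 1 with hl
  rw [foldl_best f l (-1) []]
  set M := l.foldl (fun a i => max a (f i)) (-1) with hM
  have hlen : 0 < matrix.length := List.length_pos_of_ne_nil hne
  have hlne : l ≠ [] := by
    rw [hl, PySem.List.pyRange_one_cons (by omega : (0:Int) < n)]; simp
  obtain ⟨i0, l', hcons⟩ := List.exists_cons_of_ne_nil hlne
  have h0 : 0 ≤ f i0 := colCount_nonneg matrix i0
  have hMfold : M = l'.foldl (fun a i => max a (f i)) (f i0) := by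
    rw [hM, hcons, List.foldl_cons, max_eq_right (by omega : (-1:Int) ≤ f i0)]
  have hM0 : 0 ≤ M := le_trans h0 (hMfold ▸ le_foldl_max_key f l' (f i0))
  have hMne : M ≠ -1 := by omega
  simp only [if_neg hMne, List.nil_append]
  have hmax?' : PySem.List.max? (l.map f) (fun y => y) = some M := by
    rw [hcons, List.map_cons, PySem.List.max?_id_cons, hMfold, List.foldl_map]
  have hmaxv : (PySem.List.max? (l.map f) (fun y => y)).getD 0 = M := by
    rw [hmax?']; rfl
  have hclen : ((l.map f).length : Int) = n := by
    rw [List.length_map, hl, PySem.List.length_pyRange_one]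
    simp [hn]
  rw [hmaxv, hclen]
  apply List.filter_congr
  intro i hi
  have hi' : 0 ≤ i ∧ i < n := (PySem.List.mem_pyRange_one.mp hi).imp id id
  have hget : PySem.List.pyGetD (l.map f) i 0 = f i := by
    rw [hl]; exact PySem.List.pyGetD_map_pyRange_of_nonneg f n i 0 hi'.1 hi'.2
  rw [hget]
  have hle : f i ≤ M := PySem.List.max?_isMax hmax?' (f i) (List.mem_map_of_mem hi)
  by_cases h : f i = M
  · simp [h]
  · simp [h]; omega
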